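-- pv_equiv track=rewrite | github.com/chleya/unified-sel | core/capability_benchmark.py | _count_with_word_repeat
-- ===== SOURCE A (Python) =====
-- from typing import Any, Dict, List, Sequence, Tuple
--
-- def _count_with_word_repeat(words: Sequence[str], mode: str) -> int:
--     def has_any_repeat(word: str) -> bool:
--         seen = set()
--         for char in word:
--             if char in seen:
--                 return True
--             seen.add(char)
--         return False
--
--     def has_adjacent_repeat(word: str) -> bool:
--         return any(word[i] == word[i + 1] for i in range(len(word) - 1))
--
--     if mode == "any_repeat":
--         return sum(1 for word in words if has_any_repeat(word))
--     if mode == "adjacent_repeat":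
--         return sum(1 for word in words if has_adjacent_repeat(word))
--     raise ValueError(f"Unsupported word repeat mode: {mode}")
-- ===== SOURCE B (Python) =====
-- from typing import Any, Dict, List, Sequence, Tuple
--
-- def _count_with_word_repeat(words: Sequence[str], mode: str) -> int:
--     def runs(chars) -> int:
--         # number of maximal runs of equal adjacent elements
--         n = 0
--         prev = None
--         for c in chars:
--             if c != prev:
--                 n += 1
--                 prev = c
--         return n
--
--     if mode == "any_repeat":
--         # duplicates end up adjacent after sorting, merging into one run
--         return sum(1 for w in words if runs(sorted(w)) < len(w))
--     if mode == "adjacent_repeat":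
--         return sum(1 for w in words if runs(w) < len(w))
--     raise ValueError(f"Unsupported word repeat mode: {mode}")
-- ===== Notes on version B (the rewrite author's own statement) =====
-- stated objective: alternative
-- what changed: B replaces A's per-word scans (seen-set with early exit; index loop over word[i]==word[i+1]) by one run-counting helper: a word has an adjacent repeat iff it has fewer maximal runs of equal adjacent chars than characters, and any repeat iff sorted(word) does; mode dispatch and the ValueError are kept.
import Mathlib
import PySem

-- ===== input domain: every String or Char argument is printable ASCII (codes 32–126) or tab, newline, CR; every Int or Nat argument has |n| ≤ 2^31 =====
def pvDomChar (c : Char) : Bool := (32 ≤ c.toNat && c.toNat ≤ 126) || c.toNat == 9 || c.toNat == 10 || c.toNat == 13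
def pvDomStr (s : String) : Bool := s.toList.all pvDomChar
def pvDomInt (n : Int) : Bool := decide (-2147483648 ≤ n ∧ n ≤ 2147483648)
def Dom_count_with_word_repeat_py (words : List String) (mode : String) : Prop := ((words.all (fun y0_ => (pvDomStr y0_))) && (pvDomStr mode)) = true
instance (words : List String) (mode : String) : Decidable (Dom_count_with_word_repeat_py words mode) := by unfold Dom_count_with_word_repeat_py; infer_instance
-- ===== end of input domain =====

-- B counts maximal runs of equal adjacent chars: adjacent repeat iff runs(w) < len(w), any repeat iff runs(sorted(w)) < len(w); objective: alternative (sort + run count instead of seen-set / index scans).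


-- ===== PORT A =====
-- A's has_any_repeat: scan with a growing 'seen' set, early return on a repeat
def pvHasAnyRep : List Char → PySem.Set Char → Bool
  | [], _ => false
  | c :: rest, seen =>
    if PySem.Set.contains seen c then true else pvHasAnyRep rest (PySem.Set.add seen c)

-- A's has_adjacent_repeat: any(word[i] == word[i+1] for i in range(len(word)-1))
def pvHasAdjRep (w : String) : Bool :=
  (PySem.List.pyRange 0 ((w.toList.length : Int) - 1) 1).any
    (fun i => PySem.List.pyGetD w.toList i ' ' == PySem.List.pyGetD w.toList (i + 1) ' ')

def count_with_word_repeat_py (words : List String) (mode : String) : Int :=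
  if mode == "any_repeat" then
    words.foldl (fun acc w => if pvHasAnyRep w.toList PySem.Set.empty then acc + 1 else acc) 0
  else if mode == "adjacent_repeat" then
    words.foldl (fun acc w => if pvHasAdjRep w then acc + 1 else acc) 0
  else 0  -- ValueError: excluded by Pre_

-- ===== PORT B =====
-- B's runs: n = 0, prev = None; for c in chars: if c != prev: n += 1; prev = c
def pvRuns (cs : List Char) : Nat :=
  (cs.foldl (fun (st : Nat × Option Char) c =>
      if some c ≠ st.2 then (st.1 + 1, some c) else st) ((0 : Nat), (none : Option Char))).1

def count_with_word_repeat_py_alt (words : List String) (mode : String) : Int :=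
  if mode == "any_repeat" then
    (words.countP (fun w =>
      decide (pvRuns (PySem.List.sorted w.toList (fun c => c) false) < w.toList.length)) : Int)
  else if mode == "adjacent_repeat" then
    (words.countP (fun w => decide (pvRuns w.toList < w.toList.length)) : Int)
  else 0  -- ValueError: excluded by Pre_

-- ===== PRECONDITION & SPEC =====
-- Pre_ excludes exactly the modes on which both Pythons raise ValueError.
def Pre_count_with_word_repeat_py (words : List String) (mode : String) : Prop :=
  mode = "any_repeat" ∨ mode = "adjacent_repeat"
instance (words : List String) (mode : String) : Decidable (Pre_count_with_word_repeat_py words mode) := by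
  unfold Pre_count_with_word_repeat_py; infer_instance
def pvWitness_count_with_word_repeat_py : List String × String := (["aab", "ab", "aba"], "adjacent_repeat")

def Spec_count_with_word_repeat_py (words : List String) (mode : String) (out : Int) : Prop := out = count_with_word_repeat_py_alt words mode
instance (words : List String) (mode : String) (out : Int) : Decidable (Spec_count_with_word_repeat_py words mode out) := by unfold Spec_count_with_word_repeat_py; infer_instance

-- ===== CLAIM (what is proved, stated in full; the proofs are below) =====
def Claim_equal_count_with_word_repeat_py : Prop := ∀ (words : List String) (mode : String), Dom_count_with_word_repeat_py words mode → Pre_count_with_word_repeat_py words mode → Spec_count_with_word_repeat_py words mode (count_with_word_repeat_py words mode)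

-- ===== LEMMAS AND PROOFS =====

-- a 0/1 counting foldl is countP
lemma pv_count_foldl (p : String → Bool) (words : List String) (acc : Int) :
    words.foldl (fun a w => if p w then a + 1 else a) acc = acc + words.countP p := by
  induction words generalizing acc with
  | nil => simp
  | cons w ws ih =>
    simp only [List.foldl_cons, List.countP_cons, ih]
    by_cases h : p w <;> simp [h] <;> push_cast <;> ring

-- structural form of B's run-counting loop
def pvRunsAux : Option Char → List Char → Nat
  | _, [] => 0
  | prev, c :: rest => if some c ≠ prev then pvRunsAux (some c) rest + 1 else pvRunsAux prev rest

lemma pvRuns_foldl (cs : List Char) (n : Nat) (prev : Option Char) :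
    (cs.foldl (fun (st : Nat × Option Char) c =>
       if some c ≠ st.2 then (st.1 + 1, some c) else st) (n, prev)).1 = n + pvRunsAux prev cs := by
  induction cs generalizing n prev with
  | nil => simp [pvRunsAux]
  | cons c rest ih =>
    simp only [List.foldl_cons, pvRunsAux]
    by_cases h : some c = prev
    · rw [if_neg (by simp [h]), if_neg (by simp [h]), ih]
    · rw [if_pos h, if_pos h, ih]; omega

lemma pvRuns_eq (cs : List Char) : pvRuns cs = pvRunsAux none cs := by
  unfold pvRuns
  rw [pvRuns_foldl]
  omega

lemma pvRunsAux_le (prev : Option Char) (cs : List Char) : pvRunsAux prev cs ≤ cs.length := by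
  induction cs generalizing prev with
  | nil => simp [pvRunsAux]
  | cons c rest ih =>
    simp only [pvRunsAux, List.length_cons]
    split
    · have := ih (some c); omega
    · have := ih prev; omega

-- runs = length exactly when no adjacent pair is equal (and the head differs from prev)
lemma pvRunsAux_eq_length_iff (prev : Option Char) (cs : List Char) :
    pvRunsAux prev cs = cs.length ↔
      List.IsChain (· ≠ ·) cs ∧ (∀ h, cs.head? = some h → some h ≠ prev) := by
  induction cs generalizing prev with
  | nil => simp [pvRunsAux, List.isChain_nil]
  | cons c rest ih =>
    simp only [pvRunsAux, List.length_cons, List.head?_cons, List.isChain_cons]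
    by_cases h : some c ≠ prev
    · rw [if_pos h, Nat.add_right_cancel_iff, ih (some c)]
      constructor
      · rintro ⟨hc, hh⟩
        refine ⟨⟨fun y hy => ?_, hc⟩, fun x hx => by simp only [Option.some.injEq] at hx; subst hx; exact h⟩
        exact fun he => (hh y hy) (by simp [he])
      · rintro ⟨⟨hhd, hc⟩, _⟩
        exact ⟨hc, fun x hx hex => hhd x hx (by simpa using hex.symm)⟩
    · rw [if_neg h]
      have hle := pvRunsAux_le prev rest
      constructor
      · intro he; omega
      · rintro ⟨_, hh⟩
        exact absurd (hh c rfl) (by simpa using h)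

lemma pvRuns_lt_iff (cs : List Char) :
    (pvRuns cs < cs.length) ↔ ¬ List.IsChain (· ≠ ·) cs := by
  rw [pvRuns_eq]
  constructor
  · intro hlt hc
    have : pvRunsAux none cs = cs.length := by
      rw [pvRunsAux_eq_length_iff]; exact ⟨hc, fun h _ => by simp⟩
    omega
  · intro hnc
    have hne : pvRunsAux none cs ≠ cs.length := by
      intro he
      rw [pvRunsAux_eq_length_iff] at he
      exact hnc he.1
    have := pvRunsAux_le none cs
    omega

-- A's adjacent scan is true iff some adjacent pair is equal, i.e. ¬ IsChain (≠)
lemma pv_zip_any_eq (cs : List Char) :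
    (cs.zip cs.tail).any (fun p => p.1 == p.2) = !decide (List.IsChain (· ≠ ·) cs) := by
  induction cs with
  | nil => simp [List.isChain_nil]
  | cons c rest ih =>
    cases rest with
    | nil => simp [List.IsChain]
    | cons c2 rest' =>
      simp only [List.tail_cons, List.zip_cons_cons, List.any_cons, List.isChain_cons_cons]
      rw [List.tail_cons] at ih
      rw [ih]
      by_cases h : c = c2 <;> simp [h]

-- adjacent scan over indices = any over zip with the tail
lemma pv_adj_range (cs : List Char) :
    (List.range (cs.length - 1)).any (fun k => cs.getD k ' ' == cs.getD (k + 1) ' ')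
      = (cs.zip cs.tail).any (fun p => p.1 == p.2) := by
  induction cs with
  | nil => simp
  | cons c1 rest ih =>
    cases rest with
    | nil => simp
    | cons c2 rest' =>
      simp only [List.length_cons, Nat.add_sub_cancel] at ih ⊢
      simp only [List.tail_cons, List.zip_cons_cons, List.any_cons]
      rw [List.range_succ_eq_map]
      simp only [List.any_cons, List.any_map, Function.comp_def,
        List.getD_cons_zero, List.getD_cons_succ]
      simp only [List.getD_cons_succ, List.tail_cons] at ih
      rw [ih]

lemma pv_adj_pred_eq (w : String) :
    pvHasAdjRep w = !decide (List.IsChain (· ≠ ·) w.toList) := by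
  unfold pvHasAdjRep
  rw [← pv_zip_any_eq, ← pv_adj_range, PySem.List.pyRange_one, List.any_map]
  have hc : (((w.toList.length : Int) - 1) - 0).toNat = w.toList.length - 1 := by omega
  rw [hc]
  congr 1
  funext k
  simp only [Function.comp_apply, zero_add]
  have h2 : ((k : Int) + 1) = (((k + 1 : Nat)) : Int) := by push_cast; ring
  rw [h2, PySem.List.pyGetD_natCast, PySem.List.pyGetD_natCast]

-- A's seen-set scan returns false iff the chars are distinct and disjoint from seen
lemma pvHasAnyRep_false_iff (cs : List Char) (s : PySem.Set Char) :
    pvHasAnyRep cs s = false ↔ cs.Nodup ∧ ∀ c ∈ cs, c ∉ s := by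
  induction cs generalizing s with
  | nil => simp [pvHasAnyRep]
  | cons c rest ih =>
    simp only [pvHasAnyRep]
    by_cases h : PySem.Set.contains s c
    · have hc : c ∈ s := by simpa [PySem.Set.contains] using h
      rw [if_pos h]
      simp only [Bool.true_eq_false, false_iff, not_and]
      intro _ hall
      exact hall c (by simp) hc
    · have hc : c ∉ s := by simpa [PySem.Set.contains] using h
      rw [if_neg h, ih]
      constructor
      · rintro ⟨hn, hall⟩
        refine ⟨List.nodup_cons.mpr ⟨fun hcr => hall c hcr ((PySem.Set.mem_add s c c).mpr (Or.inr rfl)), hn⟩, ?_⟩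
        intro x hx
        rcases List.mem_cons.mp hx with rfl | hx'
        · exact hc
        · exact fun hxs => hall x hx' ((PySem.Set.mem_add s c x).mpr (Or.inl hxs))
      · rintro ⟨hnc2, hall⟩
        obtain ⟨hcr, hn⟩ := List.nodup_cons.mp hnc2
        refine ⟨hn, fun x hx hxadd => ?_⟩
        rcases (PySem.Set.mem_add s c x).mp hxadd with hxs | rfl
        · exact hall x (List.mem_cons.mpr (Or.inr hx)) hxs
        · exact hcr hx

lemma pv_any_eq (cs : List Char) : pvHasAnyRep cs PySem.Set.empty = !decide cs.Nodup := by
  by_cases h : pvHasAnyRep cs PySem.Set.empty = false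
  · have hnd := (pvHasAnyRep_false_iff cs PySem.Set.empty).mp h
    rw [h, decide_eq_true hnd.1]
    rfl
  · have hb : pvHasAnyRep cs PySem.Set.empty = true := by
      cases hx : pvHasAnyRep cs PySem.Set.empty <;> simp_all
    have hnot : ¬ (cs.Nodup ∧ ∀ c ∈ cs, c ∉ (PySem.Set.empty : PySem.Set Char)) :=
      fun hx => h ((pvHasAnyRep_false_iff cs PySem.Set.empty).mpr hx)
    have hnd : ¬ cs.Nodup := by
      intro hn; exact hnot ⟨hn, by simp [PySem.Set.empty]⟩
    rw [hb, decide_eq_false hnd]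
    rfl

-- on a ≤-sorted list, no-adjacent-equal is exactly Nodup
lemma sorted_isChain_ne_iff_nodup (ys : List Char) (h : ys.Pairwise (· ≤ ·)) :
    List.IsChain (· ≠ ·) ys ↔ ys.Nodup := by
  constructor
  · intro hc
    have hlt : List.IsChain (· < ·) ys := by
      induction ys with
      | nil => exact List.isChain_nil
      | cons a t ih =>
        cases t with
        | nil => simp [List.IsChain]
        | cons b t' =>
          rw [List.isChain_cons_cons] at hc ⊢
          refine ⟨lt_of_le_of_ne ?_ hc.1, ih h.tail hc.2⟩
          exact (List.pairwise_cons.mp h).1 b (by simp)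
    exact (List.isChain_iff_pairwise.mp hlt).imp ne_of_lt
  · intro hn; exact hn.isChain

-- B's any_repeat predicate equals A's: runs(sorted cs) < |cs| ↔ ¬ Nodup cs
lemma pv_any_pred_eq (cs : List Char) :
    decide (pvRuns (PySem.List.sorted cs (fun c => c) false) < cs.length) = !decide cs.Nodup := by
  have hperm := PySem.List.sorted_perm cs (fun c => c) false
  have hlen : (PySem.List.sorted cs (fun c => c) false).length = cs.length := hperm.length_eq
  have hpw : (PySem.List.sorted cs (fun c => c) false).Pairwise (· ≤ ·) := by
    have := PySem.List.sorted_pairwise cs (fun c => c)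
    simpa using this
  rw [← hlen]
  by_cases hn : cs.Nodup
  · have hnd : (PySem.List.sorted cs (fun c => c) false).Nodup := hperm.nodup_iff.mpr hn
    simp only [hn, decide_true, Bool.not_true]
    rw [decide_eq_false_iff_not, pvRuns_lt_iff, not_not]
    exact (sorted_isChain_ne_iff_nodup _ hpw).mpr hnd
  · have hnd : ¬ (PySem.List.sorted cs (fun c => c) false).Nodup := fun hx => hn (hperm.nodup_iff.mp hx)
    simp only [hn, decide_false, Bool.not_false]
    rw [decide_eq_true_iff, pvRuns_lt_iff]
    exact fun hx => hnd ((sorted_isChain_ne_iff_nodup _ hpw).mp hx)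

-- ===== VERDICT (by name: the statement is the Claim_ definition above) =====
theorem count_with_word_repeat_py_spec : Claim_equal_count_with_word_repeat_py := by
  intro words mode _ hpre
  unfold Spec_count_with_word_repeat_py count_with_word_repeat_py count_with_word_repeat_py_alt
  rcases hpre with h | h <;> subst h <;>
    simp only [beq_self_eq_true, if_true, String.reduceBEq, Bool.false_eq_true, if_false] <;>
    rw [pv_count_foldl] <;> simp only [zero_add] <;> norm_cast
  · exact List.countP_congr (fun w _ => by rw [pv_any_pred_eq, pv_any_eq])
  · exact List.countP_congr (fun w _ => by
      rw [pv_adj_pred_eq, ← decide_not]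
      simp only [decide_eq_true_eq]
      exact (pvRuns_lt_iff w.toList).symm)
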